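-- pv_equiv track=rewrite | github.com/dufangshi/responses-to-completions-proxy | app/config.py | _extract_model_reasoning_effort
-- ===== SOURCE A (Python) =====
-- ALLOWED_REASONING_EFFORTS = {"low", "medium", "high", "xhigh"}
--
-- def _extract_model_reasoning_effort(model_name: str | None) -> tuple[str | None, str | None]:
--     if not isinstance(model_name, str):
--         return model_name, None
--
--     raw = model_name.strip()
--     if not raw:
--         return None, None
--
--     lowered = raw.lower()
--     for effort in ALLOWED_REASONING_EFFORTS:
--         suffix = f":{effort}"
--         if lowered.endswith(suffix):
--             base = raw[: -len(suffix)].strip()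
--             if base:
--                 return base, effort
--             return None, effort
--     return raw, None
-- ===== SOURCE B (Python) =====
-- ALLOWED_REASONING_EFFORTS = {"low", "medium", "high", "xhigh"}
--
-- def _extract_model_reasoning_effort(model_name):
--     if not isinstance(model_name, str):
--         return model_name, None
--
--     raw = model_name.strip()
--     if not raw:
--         return None, None
--
--     base, sep, suffix = raw.rpartition(":")
--     if not sep:
--         return raw, None
--     effort = suffix.lower()
--     if effort not in ALLOWED_REASONING_EFFORTS:
--         return raw, None
--     stripped_base = base.strip()
--     return (stripped_base if stripped_base else None), effort
-- ===== Notes on version B (the rewrite author's own statement) =====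
-- stated objective: simpler
-- what changed: Replaces A's loop that tests each allowed effort as a colon-prefixed endswith pattern by a single rpartition at the last colon followed by one set membership test on the lowered suffix.
import Mathlib
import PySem

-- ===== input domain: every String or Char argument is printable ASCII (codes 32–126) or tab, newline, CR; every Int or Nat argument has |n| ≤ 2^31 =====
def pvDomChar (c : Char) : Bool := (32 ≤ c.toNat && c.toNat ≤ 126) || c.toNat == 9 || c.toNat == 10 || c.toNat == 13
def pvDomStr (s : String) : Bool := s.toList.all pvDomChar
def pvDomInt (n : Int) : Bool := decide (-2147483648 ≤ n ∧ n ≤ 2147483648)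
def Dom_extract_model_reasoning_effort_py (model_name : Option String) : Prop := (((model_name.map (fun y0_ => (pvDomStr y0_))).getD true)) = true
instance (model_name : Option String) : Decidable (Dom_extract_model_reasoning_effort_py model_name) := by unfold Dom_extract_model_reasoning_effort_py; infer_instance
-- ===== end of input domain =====

-- B replaces A's try-each-suffix loop over the effort set by a single rpartition at the
-- last colon followed by one set lookup (objective: simpler; same return values).


-- ===== PORT A =====
-- ALLOWED_REASONING_EFFORTS = {"low", "medium", "high", "xhigh"}
def ALLOWED_REASONING_EFFORTS : PySem.Set String :=
  PySem.Set.ofList ["low", "medium", "high", "xhigh"]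

-- 'for effort in ALLOWED_REASONING_EFFORTS: …' — iteration over a set; the written
-- insertion order is used (the result is order-independent: at most one ':'+effort
-- suffix can match, and a non-match continues the loop unchanged).
def loopA (raw lowered : String) : List String → Option String × Option String
  | [] => (some raw, none)
  | effort :: rest =>
    let suffix := ":" ++ effort
    if PySem.Str.endswith lowered suffix then
      let base := PySem.Str.strip (PySem.Str.slice raw none (some (-(PySem.Str.len suffix))))
      if base ≠ "" then (some base, some effort) else (none, some effort)
    else loopA raw lowered rest

def extract_model_reasoning_effort_py (model_name : Option String) : Option String × Option String :=
  match model_name with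
  | none => (none, none)          -- not a str
  | some s =>
    let raw := PySem.Str.strip s
    if raw = "" then (none, none)
    else loopA raw (PySem.Str.lower raw) ALLOWED_REASONING_EFFORTS

-- ===== PORT B =====
-- raw.rpartition(":"), ported via rfind (exact: rpartition splits at the HIGHEST
-- occurrence of ":"; sep = "" iff rfind = -1).
def extract_model_reasoning_effort_py_alt (model_name : Option String) : Option String × Option String :=
  match model_name with
  | none => (none, none)          -- not a str
  | some s =>
    let raw := PySem.Str.strip s
    if raw = "" then (none, none)
    else
      let i := PySem.Str.rfind raw ":"
      if i < 0 then (some raw, none)    -- no colon: sep == ""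
      else
        let effort := PySem.Str.lower (PySem.Str.slice raw (some (i + 1)) none)
        if PySem.Set.contains ALLOWED_REASONING_EFFORTS effort then
          let stripped_base := PySem.Str.strip (PySem.Str.slice raw none (some i))
          (if stripped_base ≠ "" then some stripped_base else none, some effort)
        else (some raw, none)

-- ===== PRECONDITION & SPEC =====
def Spec_extract_model_reasoning_effort_py (model_name : Option String) (out : Option String × Option String) : Prop := out = extract_model_reasoning_effort_py_alt model_name
instance (model_name : Option String) (out : Option String × Option String) : Decidable (Spec_extract_model_reasoning_effort_py model_name out) := by unfold Spec_extract_model_reasoning_effort_py; infer_instance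

-- ===== CLAIM (what is proved, stated in full; the proofs are below) =====
def Claim_equal_extract_model_reasoning_effort_py : Prop := ∀ (model_name : Option String), Dom_extract_model_reasoning_effort_py model_name → Spec_extract_model_reasoning_effort_py model_name (extract_model_reasoning_effort_py model_name)

-- ===== LEMMAS AND PROOFS =====

theorem lowerChar_colon : PySem.Chars.lowerChar ':' = ':' := by decide

theorem lowerChar_eq_colon {a : Char} (h : PySem.Chars.lowerChar a = ':') : a = ':' := by
  unfold PySem.Chars.lowerChar PySem.Chars.isupper at h
  split at h
  · rename_i hu
    simp only [Bool.and_eq_true, decide_eq_true_eq] at hu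
    have h1 : (65 : Nat) ≤ a.toNat := hu.1
    have h2 : a.toNat ≤ (90 : Nat) := hu.2
    have hv : Nat.isValidChar (a.toNat + 32) := by left; omega
    have := congrArg Char.toNat h
    rw [Char.toNat_ofNat] at this
    rw [if_pos hv] at this
    have : a.toNat + 32 = 58 := this
    omega
  · exact h

theorem singleton_isPrefixOf (c : Char) (xs : List Char) :
    [c].isPrefixOf xs = true ↔ xs.head? = some c := by
  rw [List.isPrefixOf_iff_prefix]
  cases xs with
  | nil => simp
  | cons y ys => simp [List.cons_prefix_cons, eq_comm]

theorem rfind_go_none (l : List Char) (c : Char) (k : ℕ)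
    (h : ∀ j, j ≤ k → l[j]? ≠ some c) : PySem.Chars.rfind.go l [c] k = -1 := by
  induction k with
  | zero =>
    unfold PySem.Chars.rfind.go
    rw [if_neg]
    intro hp
    rw [singleton_isPrefixOf] at hp
    exact h 0 (le_refl _) (by simpa [List.head?_eq_getElem?] using hp)
  | succ j ih =>
    unfold PySem.Chars.rfind.go
    rw [if_neg]
    · exact ih (fun j' hj' => h j' (Nat.le_succ_of_le hj'))
    intro hp
    rw [singleton_isPrefixOf] at hp
    exact h (j+1) (le_refl _) (by simpa [List.head?_eq_getElem?, List.getElem?_drop] using hp)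

theorem rfind_go_found (l : List Char) (c : Char) (k : ℕ) (i : ℕ)
    (hi : l[i]? = some c) (hik : i ≤ k)
    (hmax : ∀ j, i < j → j ≤ k → l[j]? ≠ some c) :
    PySem.Chars.rfind.go l [c] k = (i : ℤ) := by
  induction k with
  | zero =>
    have h0 : i = 0 := Nat.le_zero.mp hik
    subst h0
    have hp : [c].isPrefixOf l = true := by
      rw [singleton_isPrefixOf]; simpa [List.head?_eq_getElem?] using hi
    unfold PySem.Chars.rfind.go
    rw [if_pos hp]
    simp
  | succ j ih =>
    unfold PySem.Chars.rfind.go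
    by_cases hij : i = j + 1
    · subst hij
      have hp : [c].isPrefixOf (l.drop (j+1)) = true := by
        rw [singleton_isPrefixOf]
        simpa [List.head?_eq_getElem?, List.getElem?_drop] using hi
      rw [if_pos hp]
    · have hij' : i ≤ j := by omega
      have hp : ¬ [c].isPrefixOf (l.drop (j+1)) = true := by
        intro hp
        rw [singleton_isPrefixOf] at hp
        exact hmax (j+1) (by omega) (le_refl _)
          (by simpa [List.head?_eq_getElem?, List.getElem?_drop] using hp)
      rw [if_neg hp]
      exact ih hij' (fun j' h1 h2 => hmax j' h1 (Nat.le_succ_of_le h2))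

theorem rfind_no_colon (l : List Char) (h : ':' ∉ l) :
    PySem.Chars.rfind l [':'] = -1 := by
  unfold PySem.Chars.rfind
  exact rfind_go_none _ _ _ (fun j _ hj => h (List.mem_of_getElem? hj))

theorem rfind_last_colon (p t : List Char) (ht : ':' ∉ t) :
    PySem.Chars.rfind (p ++ ':' :: t) [':'] = (p.length : ℤ) := by
  unfold PySem.Chars.rfind
  have h1 : (p ++ ':' :: t)[p.length]? = some ':' := by simp
  have h2 : p.length ≤ (p ++ ':' :: t).length := by simp
  refine rfind_go_found _ _ _ _ h1 h2 ?_
  intro j hj1 hj2 hj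
  have : (p ++ ':' :: t)[j]? = t[j - p.length - 1]? := by
    rw [List.getElem?_append_right (by omega)]
    rw [show j - p.length = (j - p.length - 1) + 1 by omega]
    simp
  rw [this] at hj
  exact ht (List.mem_of_getElem? hj)

theorem last_colon_unique {p t p' t' : List Char} (ht : ':' ∉ t) (ht' : ':' ∉ t')
    (h : p ++ ':' :: t = p' ++ ':' :: t') : p = p' ∧ t = t' := by
  have key : ∀ (a b a' b' : List Char), a ++ ':' :: b = a' ++ ':' :: b' → ':' ∉ b →
      b.length ≤ b'.length := by
    intro a b a' b' hab hb
    by_contra hl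
    push Not at hl
    have h1 : (':' :: b') <:+ (a ++ ':' :: b) := by rw [hab]; exact List.suffix_append _ _
    have h2 : b <:+ (a ++ ':' :: b) := (List.suffix_cons _ _).trans (List.suffix_append _ _)
    rcases List.suffix_or_suffix_of_suffix h1 h2 with hs | hs
    · exact hb (hs.mem (by simp))
    · have hle := hs.length_le
      have heq : b = ':' :: b' := hs.eq_of_length
        (by simp only [List.length_cons] at hle ⊢; omega)
      exact hb (by rw [heq]; simp)
  have hlen : t.length = t'.length :=
    Nat.le_antisymm (key _ _ _ _ h ht) (key _ _ _ _ h.symm ht')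
  have := List.append_inj h (by have := congrArg List.length h; simp at this ⊢; omega)
  exact ⟨this.1, by simpa using this.2⟩

theorem endswith_char (l e : List Char) :
    ((':' :: e) <:+ l.map PySem.Chars.lowerChar) ↔
      ∃ p t, l = p ++ ':' :: t ∧ t.map PySem.Chars.lowerChar = e := by
  constructor
  · rintro ⟨u, hu⟩
    rw [List.append_eq_map_iff] at hu
    rcases hu with ⟨p, rest, hl, hp, hrest⟩
    rw [List.map_eq_cons_iff] at hrest
    rcases hrest with ⟨d, t, hrest, hd, htm⟩
    have hdc : d = ':' := lowerChar_eq_colon hd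
    exact ⟨p, t, by rw [hl, hrest, hdc], htm⟩
  · rintro ⟨p, t, hl, htm⟩
    refine ⟨p.map PySem.Chars.lowerChar, ?_⟩
    rw [hl]
    simp [htm, lowerChar_colon]

theorem loopA_no_match (raw lowered : String) (es : List String)
    (h : ∀ e ∈ es, PySem.Str.endswith lowered (":" ++ e) = false) :
    loopA raw lowered es = (some raw, none) := by
  induction es with
  | nil => rfl
  | cons e rest ih =>
    simp only [loopA, h e (by simp), Bool.false_eq_true, if_false]
    exact ih (fun e' he' => h e' (by simp [he']))

theorem match_iff (raw : String) (p t : List Char) (e : List Char)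
    (hl : raw.toList = p ++ ':' :: t) (ht : ':' ∉ t) (he : ':' ∉ e) :
    (PySem.Str.endswith (PySem.Str.lower raw) (String.ofList (':' :: e)) = true
      ↔ t.map PySem.Chars.lowerChar = e) := by
  rw [PySem.Str.endswith, PySem.Str.lower]
  simp only [String.toList_ofList, PySem.Chars.lower]
  rw [PySem.Chars.endswith, List.isSuffixOf_iff_suffix]
  rw [endswith_char]
  constructor
  · rintro ⟨p', t', hl', hm⟩
    have ht' : ':' ∉ t' := by
      intro hmem
      have : PySem.Chars.lowerChar ':' ∈ t'.map PySem.Chars.lowerChar :=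
        List.mem_map_of_mem hmem
      rw [hm] at this
      exact he (by simpa using this)
    obtain ⟨hp, htt⟩ := last_colon_unique ht ht' (hl ▸ hl')
    rw [htt]; exact hm
  · intro hm
    exact ⟨p, t, hl, hm⟩

theorem exists_last_colon (l : List Char) (hc : ':' ∈ l) :
    ∃ p t, l = p ++ ':' :: t ∧ ':' ∉ t := by
  have hm : ':' ∈ l.reverse := by simpa using hc
  have hdw : l.reverse.dropWhile (fun c => decide (c ≠ ':')) ≠ [] := by
    intro h0
    rw [List.dropWhile_eq_nil_iff] at h0
    simpa using h0 _ hm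
  have hhead : (l.reverse.dropWhile (fun c => decide (c ≠ ':'))).head hdw = ':' := by
    have := List.head_dropWhile_not (p := fun c => decide (c ≠ ':')) hdw
    simpa using this
  refine ⟨((l.reverse.dropWhile (fun c => decide (c ≠ ':'))).tail).reverse,
          (l.reverse.takeWhile (fun c => decide (c ≠ ':'))).reverse, ?_, ?_⟩
  · conv_lhs => rw [← List.reverse_reverse l,
      ← List.takeWhile_append_dropWhile (p := fun c => decide (c ≠ ':')) (l := l.reverse)]
    rw [← List.cons_head_tail hdw, hhead]
    simp
  · intro hmem
    have := List.mem_takeWhile_imp (by simpa using hmem)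
    simp at this

theorem core_eq (raw : String) :
    loopA raw (PySem.Str.lower raw) ALLOWED_REASONING_EFFORTS
      = (let i := PySem.Str.rfind raw ":"
         if i < 0 then (some raw, none)
         else
           let effort := PySem.Str.lower (PySem.Str.slice raw (some (i + 1)) none)
           if PySem.Set.contains ALLOWED_REASONING_EFFORTS effort then
             let stripped_base := PySem.Str.strip (PySem.Str.slice raw none (some i))
             (if stripped_base ≠ "" then some stripped_base else none, some effort)
           else (some raw, none)) := by
  by_cases hc : ':' ∈ raw.toList
  · -- a colon exists: decompose at the LAST colon
    obtain ⟨p, t, hl, ht⟩ := exists_last_colon raw.toList hc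
    -- characterisation of A's suffix tests and of B's parsed suffix
    have hrf : PySem.Str.rfind raw ":" = (p.length : ℤ) := by
      rw [PySem.Str.rfind, show (":" : String).toList = [':'] from rfl, hl]
      exact rfind_last_colon p t ht
    have hkey : ∀ (e : String), ':' ∉ e.toList →
        (PySem.Str.endswith (PySem.Str.lower raw) (":" ++ e) = true ↔
          String.ofList (t.map PySem.Chars.lowerChar) = e) := by
      intro e he
      rw [show ((":" : String) ++ e) = String.ofList (':' :: e.toList) by
            apply String.toList_inj.mp; simp]
      rw [match_iff raw p t e.toList hl ht he]
      rw [← String.toList_inj, String.toList_ofList]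
    have heff : PySem.Str.lower (PySem.Str.slice raw (some ((p.length : ℤ) + 1)) none)
        = String.ofList (t.map PySem.Chars.lowerChar) := by
      rw [← String.toList_inj, PySem.Str.toList_lower, PySem.Str.toList_slice,
        String.toList_ofList, PySem.Chars.lower, PySem.Chars.slice_eq_listSlice]
      congr 1
      rw [show ((p.length : ℤ) + 1) = ((p.length + 1 : ℕ) : ℤ) by push_cast; ring]
      rw [PySem.List.slice_from_natCast]
      rw [hl, show p ++ ':' :: t = (p ++ [':']) ++ t by simp]
      rw [List.drop_append_of_le_length (by simp)]
      simp
    have hbaseB : PySem.Str.slice raw none (some (p.length : ℤ)) = String.ofList p := by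
      rw [← String.toList_inj, PySem.Str.toList_slice, String.toList_ofList,
        PySem.Chars.slice_eq_listSlice]
      rw [PySem.List.slice_to _ (by positivity)]
      rw [Int.toNat_natCast, hl, List.take_left]
    have hlength : raw.toList.length = p.length + 1 + t.length := by
      rw [hl]; simp; omega
    have hbaseA : ∀ k : ℕ, 0 < k → t.length + 1 = k →
        PySem.Str.slice raw none (some (-(k : ℤ))) = String.ofList p := by
      intro k hk htk
      rw [← String.toList_inj, PySem.Str.toList_slice, String.toList_ofList,
        PySem.Chars.slice_eq_listSlice]
      rw [PySem.List.slice_to_neg_natCast _ _ hk]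
      rw [show raw.toList.length - k = p.length by omega]
      rw [hl, List.take_left]
    have hA : ALLOWED_REASONING_EFFORTS = ["low", "medium", "high", "xhigh"] := by decide
    have hnn : ¬ ((p.length : ℤ) < 0) := by omega
    have htl : ∀ (e : String), String.ofList (t.map PySem.Chars.lowerChar) = e →
        t.length = e.toList.length := by
      intro e hme
      have := congrArg String.toList hme
      rw [String.toList_ofList] at this
      simpa using congrArg List.length this
    simp only [hrf, hnn, if_false]
    rw [hbaseB, heff]
    by_cases h1 : String.ofList (t.map PySem.Chars.lowerChar) = "low"
    · rw [hA]
      simp only [loopA]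
      rw [if_pos ((hkey "low" (by decide)).mpr h1)]
      rw [show (-(PySem.Str.len (":" ++ "low"))) = -((4:ℕ) : ℤ) by decide]
      rw [hbaseA 4 (by norm_num) (by have := htl _ h1; simp at this; omega)]
      rw [h1]
      rw [if_pos (show PySem.Set.contains ["low", "medium", "high", "xhigh"] "low" = true by decide)]
      by_cases hb : PySem.Str.strip (String.ofList p) = "" <;> simp [hb]
    by_cases h2 : String.ofList (t.map PySem.Chars.lowerChar) = "medium"
    · rw [hA]
      simp only [loopA]
      rw [if_neg (fun hh => h1 ((hkey "low" (by decide)).mp hh))]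
      rw [if_pos ((hkey "medium" (by decide)).mpr h2)]
      rw [show (-(PySem.Str.len (":" ++ "medium"))) = -((7:ℕ) : ℤ) by decide]
      rw [hbaseA 7 (by norm_num) (by have := htl _ h2; simp at this; omega)]
      rw [h2]
      rw [if_pos (show PySem.Set.contains ["low", "medium", "high", "xhigh"] "medium" = true by decide)]
      by_cases hb : PySem.Str.strip (String.ofList p) = "" <;> simp [hb]
    by_cases h3 : String.ofList (t.map PySem.Chars.lowerChar) = "high"
    · rw [hA]
      simp only [loopA]
      rw [if_neg (fun hh => h1 ((hkey "low" (by decide)).mp hh))]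
      rw [if_neg (fun hh => h2 ((hkey "medium" (by decide)).mp hh))]
      rw [if_pos ((hkey "high" (by decide)).mpr h3)]
      rw [show (-(PySem.Str.len (":" ++ "high"))) = -((5:ℕ) : ℤ) by decide]
      rw [hbaseA 5 (by norm_num) (by have := htl _ h3; simp at this; omega)]
      rw [h3]
      rw [if_pos (show PySem.Set.contains ["low", "medium", "high", "xhigh"] "high" = true by decide)]
      by_cases hb : PySem.Str.strip (String.ofList p) = "" <;> simp [hb]
    by_cases h4 : String.ofList (t.map PySem.Chars.lowerChar) = "xhigh"
    · rw [hA]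
      simp only [loopA]
      rw [if_neg (fun hh => h1 ((hkey "low" (by decide)).mp hh))]
      rw [if_neg (fun hh => h2 ((hkey "medium" (by decide)).mp hh))]
      rw [if_neg (fun hh => h3 ((hkey "high" (by decide)).mp hh))]
      rw [if_pos ((hkey "xhigh" (by decide)).mpr h4)]
      rw [show (-(PySem.Str.len (":" ++ "xhigh"))) = -((6:ℕ) : ℤ) by decide]
      rw [hbaseA 6 (by norm_num) (by have := htl _ h4; simp at this; omega)]
      rw [h4]
      rw [if_pos (show PySem.Set.contains ["low", "medium", "high", "xhigh"] "xhigh" = true by decide)]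
      by_cases hb : PySem.Str.strip (String.ofList p) = "" <;> simp [hb]
    have hcon : PySem.Set.contains ALLOWED_REASONING_EFFORTS
        (String.ofList (t.map PySem.Chars.lowerChar)) = false := by
      rw [Bool.eq_false_iff]
      intro hcc
      rw [PySem.Set.contains_iff] at hcc
      rw [hA] at hcc
      simp only [List.mem_cons, List.not_mem_nil, or_false] at hcc
      rcases hcc with h | h | h | h
      exacts [h1 h, h2 h, h3 h, h4 h]
    simp only [hcon, Bool.false_eq_true, if_false]
    rw [loopA_no_match]
    intro e he
    rw [hA] at he
    rw [Bool.eq_false_iff]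
    intro hh
    simp only [List.mem_cons, List.not_mem_nil, or_false] at he
    rcases he with rfl | rfl | rfl | rfl
    exacts [h1 ((hkey _ (by decide)).mp hh), h2 ((hkey _ (by decide)).mp hh),
      h3 ((hkey _ (by decide)).mp hh), h4 ((hkey _ (by decide)).mp hh)]

  · -- no colon anywhere
    have hrf : PySem.Str.rfind raw ":" = -1 := by
      rw [PySem.Str.rfind]
      exact rfind_no_colon _ (by simpa using hc)
    rw [loopA_no_match]
    · simp only [hrf]; norm_num
    · intro e he
      rw [Bool.eq_false_iff]
      intro hend
      rw [show ((":" : String) ++ e) = String.ofList (':' :: e.toList) by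
            apply String.toList_inj.mp; simp] at hend
      rw [PySem.Str.endswith, PySem.Str.lower] at hend
      simp only [String.toList_ofList, PySem.Chars.lower] at hend
      rw [PySem.Chars.endswith, List.isSuffixOf_iff_suffix] at hend
      rw [endswith_char] at hend
      obtain ⟨p, t, hl, -⟩ := hend
      exact hc (by rw [hl]; simp)

-- ===== VERDICT (by name: the statement is the Claim_ definition above) =====
theorem extract_model_reasoning_effort_py_spec : Claim_equal_extract_model_reasoning_effort_py := by
  intro model_name _
  unfold Spec_extract_model_reasoning_effort_py
  match model_name with
  | none => rfl
  | some s =>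
    unfold extract_model_reasoning_effort_py extract_model_reasoning_effort_py_alt
    dsimp only
    by_cases h : PySem.Str.strip s = ""
    · rw [if_pos h, if_pos h]
    · rw [if_neg h, if_neg h]
      exact core_eq (PySem.Str.strip s)
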